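-- pv_equiv track=rewrite | github.com/ryankuhn/NerdleSolver | nerdle_main.py | nonadjacent_operands
-- ===== SOURCE A (Python) =====
-- operation_opts = ["+", "-", "/", "*", "="]
--
-- def nonadjacent_operands(input):
--     # Check to make sure an operand or = is not at the beginning or end
--     if input[0] in operation_opts or input[0] == "=":
--         return False
--     if input[-1] in operation_opts or input[-1] == "=":
--         return False
--
--     # Check that theres only 1 =
--     if input.count("=") != 1:
--         return False
--
--     # Checks if the operators are next to eachother. If so, returns False
--     for i in range(1,len(input)-2):
--         if input[i] in operation_opts:
--             if input[i+1] in operation_opts: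
--                 return False
--             else:
--                 continue
--         else:
--             continue
--     # Return True
--     return True
-- ===== SOURCE B (Python) =====
-- operation_opts = ["+", "-", "/", "*", "="]
--
-- def nonadjacent_operands(input):
--     ops = set(operation_opts)
--     # Guards: no operator/'=' at either end (input[0]/input[-1] raise on empty, like A)
--     if input[0] in ops or input[-1] in ops:
--         return False
--     # Exactly one '='
--     if input.count("=") != 1:
--         return False
--     # Index table of operator positions; valid iff no two are adjacent
--     positions = [i for i, ch in enumerate(input) if ch in ops]
--     return all(b - a > 1 for a, b in zip(positions, positions[1:]))
-- ===== Notes on version B (the rewrite author's own statement) =====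
-- stated objective: alternative
-- what changed: Replaces A's windowed loop over the interior index range (checking input[i], input[i+1]) by building the list of all operator positions via enumerate and checking that consecutive positions differ by more than 1; correctness of dropping A's range restriction relies on the end-guards forcing the endpoints non-operator.
import Mathlib
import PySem

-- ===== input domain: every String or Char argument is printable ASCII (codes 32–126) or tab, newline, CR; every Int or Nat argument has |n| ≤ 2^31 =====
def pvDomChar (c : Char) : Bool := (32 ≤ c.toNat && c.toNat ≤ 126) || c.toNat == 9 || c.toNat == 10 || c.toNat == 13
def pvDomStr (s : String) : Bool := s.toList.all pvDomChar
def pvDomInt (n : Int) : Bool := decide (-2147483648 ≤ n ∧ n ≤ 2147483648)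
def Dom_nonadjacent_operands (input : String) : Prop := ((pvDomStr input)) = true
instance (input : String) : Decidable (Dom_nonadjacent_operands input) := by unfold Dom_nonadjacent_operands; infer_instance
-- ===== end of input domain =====

-- B replaces A's windowed interior-index loop by an operator-position table with a pairwise gap check; alternative decomposition, same cost.


-- ===== PORT A =====
-- operation_opts = ["+", "-", "/", "*", "="]  (a 1-char string of input is in it iff its char is in this char list)
def pvOps : List Char := ['+', '-', '/', '*', '=']

-- the for-loop of A over the list of range indices, with its early `return False`
def pvLoopA (cs : List Char) : List Int → Bool
  | [] => true
  | i :: rest =>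
      if pvOps.contains (PySem.List.pyGetD cs i ' ') then
        if pvOps.contains (PySem.List.pyGetD cs (i + 1) ' ') then false
        else pvLoopA cs rest
      else pvLoopA cs rest

def nonadjacent_operands (input : String) : Bool :=
  let cs := input.toList
  match PySem.List.pyGet? cs 0 with
  | none => false  -- IndexError on input[0]; excluded by Pre_
  | some c0 =>
    if pvOps.contains c0 || (c0 == '=') then false
    else
      match PySem.List.pyGet? cs (-1) with
      | none => false  -- IndexError on input[-1]; excluded by Pre_
      | some cl =>
        if pvOps.contains cl || (cl == '=') then false
        else if PySem.Chars.count cs ['='] ≠ 1 then false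
        else pvLoopA cs (PySem.List.pyRange 1 ((cs.length : Int) - 2) 1)

-- ===== PORT B =====
def nonadjacent_operands_alt (input : String) : Bool :=
  let cs := input.toList
  match PySem.List.pyGet? cs 0, PySem.List.pyGet? cs (-1) with
  | some c0, some cl =>
    if pvOps.contains c0 || pvOps.contains cl then false
    else if PySem.Chars.count cs ['='] ≠ 1 then false
    else
      let positions := ((PySem.List.enumerate cs 0).filter (fun p => pvOps.contains p.2)).map (·.1)
      (positions.zip positions.tail).all (fun p => decide (p.2 - p.1 > 1))
  | _, _ => false  -- IndexError on input[0]/input[-1]; excluded by Pre_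

-- ===== PRECONDITION & SPEC =====
-- Pre_ excludes only the empty string, on which A (and B) raise IndexError at input[0].
def Pre_nonadjacent_operands (input : String) : Prop := input.toList ≠ []
instance (input : String) : Decidable (Pre_nonadjacent_operands input) := by unfold Pre_nonadjacent_operands; infer_instance
def pvWitness_nonadjacent_operands : String := "1+2=3"

def Spec_nonadjacent_operands (input : String) (out : Bool) : Prop := out = nonadjacent_operands_alt input
instance (input : String) (out : Bool) : Decidable (Spec_nonadjacent_operands input out) := by unfold Spec_nonadjacent_operands; infer_instance

-- ===== CLAIM (what is proved, stated in full; the proofs are below) =====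
def Claim_equal_nonadjacent_operands : Prop := ∀ (input : String), Dom_nonadjacent_operands input → Pre_nonadjacent_operands input → Spec_nonadjacent_operands input (nonadjacent_operands input)

-- ===== LEMMAS AND PROOFS =====

-- the common reference predicate: no two adjacent operator characters
def pvNoAdj : List Char → Bool
  | a :: b :: rest => !(decide (a ∈ pvOps) && decide (b ∈ pvOps)) && pvNoAdj (b :: rest)
  | _ => true

-- B's position table, parametrised by the start index of enumerate
def pvPosFrom (k : Int) (cs : List Char) : List Int :=
  ((PySem.List.enumerate cs k).filter (fun p => decide (p.2 ∈ pvOps))).map (·.1)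

def pvGaps (l : List Int) : Bool := (l.zip l.tail).all (fun p => decide (p.2 - p.1 > 1))

theorem pvPosFrom_cons (k : Int) (a : Char) (cs : List Char) :
    pvPosFrom k (a :: cs) =
      if a ∈ pvOps then k :: pvPosFrom (k + 1) cs else pvPosFrom (k + 1) cs := by
  by_cases h : a ∈ pvOps <;>
    simp [pvPosFrom, PySem.List.enumerate_cons, h]

theorem pvPosFrom_lb (k : Int) (cs : List Char) : ∀ j ∈ pvPosFrom k cs, k ≤ j := by
  induction cs generalizing k with
  | nil => simp [pvPosFrom]
  | cons a cs ih =>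
    intro j hj
    rw [pvPosFrom_cons] at hj
    split at hj
    · rcases List.mem_cons.mp hj with h | h
      · omega
      · have := ih (k + 1) j h; omega
    · have := ih (k + 1) j hj; omega

theorem pvGaps_cons_cons (a b : Int) (l : List Int) :
    pvGaps (a :: b :: l) = (decide (b - a > 1) && pvGaps (b :: l)) := by
  simp [pvGaps]

-- B's gap check on the position table equals the adjacency predicate, unconditionally
theorem pvGaps_posFrom (cs : List Char) (k : Int) : pvGaps (pvPosFrom k cs) = pvNoAdj cs := by
  induction cs generalizing k with
  | nil => simp [pvPosFrom, pvGaps, pvNoAdj]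
  | cons a cs ih =>
    rw [pvPosFrom_cons]
    by_cases ha : a ∈ pvOps
    · simp only [ha, if_true]
      cases cs with
      | nil => simp [pvPosFrom, pvGaps, pvNoAdj]
      | cons b r =>
        by_cases hb : b ∈ pvOps
        · rw [pvPosFrom_cons]
          simp only [hb, if_true, pvGaps_cons_cons]
          have : pvNoAdj (a :: b :: r) = (!(decide (a ∈ pvOps) && decide (b ∈ pvOps)) && pvNoAdj (b :: r)) := rfl
          rw [this]
          simp [ha, hb]
        · have hstep : pvPosFrom (k + 1) (b :: r) = pvPosFrom (k + 1 + 1) r := by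
            rw [pvPosFrom_cons]; simp [hb]
          have hIH := ih (k + 1)
          rw [hstep] at hIH
          have hgoal : pvGaps (k :: pvPosFrom (k + 1 + 1) r) = pvGaps (pvPosFrom (k + 1 + 1) r) := by
            cases hpf : pvPosFrom (k + 1 + 1) r with
            | nil => simp [pvGaps]
            | cons h t =>
              have hmem : h ∈ pvPosFrom (k + 1 + 1) r := by rw [hpf]; exact List.mem_cons_self
              have hle := pvPosFrom_lb (k + 1 + 1) r h hmem
              rw [pvGaps_cons_cons]
              simp only [Bool.and_eq_right_iff_imp]
              intro _; exact decide_eq_true (by omega)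
          rw [hstep, hgoal, hIH]
          have : pvNoAdj (a :: b :: r) = (!(decide (a ∈ pvOps) && decide (b ∈ pvOps)) && pvNoAdj (b :: r)) := rfl
          rw [this]
          simp [hb]
    · simp only [ha, if_false]
      rw [ih (k + 1)]
      cases cs with
      | nil => simp [pvNoAdj]
      | cons b r =>
        have : pvNoAdj (a :: b :: r) = (!(decide (a ∈ pvOps) && decide (b ∈ pvOps)) && pvNoAdj (b :: r)) := rfl
        rw [this]
        simp [ha]

-- A's loop body over a list of indices is an `all`
theorem pvLoopA_eq_all (cs : List Char) (l : List Int) :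
    pvLoopA cs l = l.all (fun i =>
      !(decide (PySem.List.pyGetD cs i ' ' ∈ pvOps) && decide (PySem.List.pyGetD cs (i + 1) ' ' ∈ pvOps))) := by
  induction l with
  | nil => rfl
  | cons i rest ih =>
    by_cases h1 : PySem.List.pyGetD cs i ' ' ∈ pvOps <;>
      by_cases h2 : PySem.List.pyGetD cs (i + 1) ' ' ∈ pvOps <;>
        simp [pvLoopA, h1, h2, ih]

-- the adjacency predicate as an `all` over Nat indices
theorem pvNoAdj_eq_range_all (cs : List Char) :
    pvNoAdj cs = (List.range (cs.length - 1)).all (fun i =>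
      !(decide (cs.getD i ' ' ∈ pvOps) && decide (cs.getD (i + 1) ' ' ∈ pvOps))) := by
  induction cs with
  | nil => rfl
  | cons a cs ih =>
    cases cs with
    | nil => rfl
    | cons b r =>
      have hlen : (a :: b :: r).length - 1 = ((b :: r).length - 1) + 1 := by
        simp
      rw [hlen, List.range_succ_eq_map]
      simp only [List.all_cons, List.all_map]
      have h1 : pvNoAdj (a :: b :: r) = (!(decide (a ∈ pvOps) && decide (b ∈ pvOps)) && pvNoAdj (b :: r)) := rfl
      rw [h1, ih]
      simp [Function.comp_def, Nat.succ_eq_add_one]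
      rfl

theorem pvGetD_int_nat (cs : List Char) (k : Nat) :
    PySem.List.pyGetD cs (1 + (k : Int)) ' ' = cs.getD (k + 1) ' ' := by
  have h : (1 : Int) + (k : Int) = ((k + 1 : Nat) : Int) := by push_cast; ring
  rw [h, PySem.List.pyGetD_natCast]

-- A's interior loop equals the full adjacency predicate when both endpoints are non-operators
theorem pvLoopA_range_eq_noAdj (cs : List Char) (hne : cs ≠ [])
    (h0 : cs.getD 0 ' ' ∉ pvOps)
    (hl : cs.getD (cs.length - 1) ' ' ∉ pvOps) :
    pvLoopA cs (PySem.List.pyRange 1 ((cs.length : Int) - 2) 1) = pvNoAdj cs := by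
  have harg : (((cs.length : Int) - 2) - 1).toNat = cs.length - 3 := by omega
  have hfun : ∀ k : Nat,
      ((fun i : Int => !(decide (PySem.List.pyGetD cs i ' ' ∈ pvOps)
          && decide (PySem.List.pyGetD cs (i + 1) ' ' ∈ pvOps))) ∘ (fun k : Nat => (1 : Int) + ↑k)) k
      = !(decide (cs.getD (k + 1) ' ' ∈ pvOps) && decide (cs.getD (k + 1 + 1) ' ' ∈ pvOps)) := by
    intro k
    simp only [Function.comp_apply]
    rw [pvGetD_int_nat,
      show (1 : Int) + ↑k + 1 = 1 + ((k + 1 : Nat) : Int) by push_cast; ring,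
      pvGetD_int_nat]
  rw [pvLoopA_eq_all, PySem.List.pyRange_one, List.all_map, harg, funext hfun,
    pvNoAdj_eq_range_all cs]
  rcases cs with _ | ⟨a, cs'⟩
  · exact absurd rfl hne
  rcases cs' with _ | ⟨b, r⟩
  · rfl
  rcases r with _ | ⟨c, r'⟩
  · -- length 2: interior range empty, the single pair is guarded by the endpoints
    simp at h0 hl ⊢
    exact Or.inl h0
  · -- length ≥ 3: range (n-1) = 0 :: map (+1) (range (n-3)) ++ [n-2]
    generalize hcs : (a :: b :: c :: r') = cs at h0 hl ⊢
    have hn3 : 3 ≤ cs.length := by rw [← hcs]; simp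
    have hdecomp : List.range (cs.length - 1)
        = 0 :: ((List.range (cs.length - 3)).map (· + 1)) ++ [cs.length - 2] := by
      have h1 : cs.length - 1 = (cs.length - 2) + 1 := by omega
      have h2 : cs.length - 2 = (cs.length - 3) + 1 := by omega
      rw [h1, List.range_succ, h2, List.range_succ_eq_map]
    rw [hdecomp]
    simp only [List.cons_append, List.all_cons, List.all_append, List.all_map, List.all_nil]
    have hd0 : decide (cs.getD 0 ' ' ∈ pvOps) = false := decide_eq_false h0
    have hdl : decide (cs.getD (cs.length - 2 + 1) ' ' ∈ pvOps) = false := by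
      rw [show cs.length - 2 + 1 = cs.length - 1 by omega]
      exact decide_eq_false hl
    rw [hd0, hdl]
    simp [Function.comp_def]

-- the two ports agree on every nonempty string
theorem pvPorts_eq (input : String) (hne : input.toList ≠ []) :
    nonadjacent_operands input = nonadjacent_operands_alt input := by
  rcases hcs : input.toList with _ | ⟨c0, rest⟩
  · exact absurd hcs hne
  have hget0 : PySem.List.pyGet? input.toList 0 = some c0 := by
    rw [hcs]; exact PySem.List.pyGet?_zero_cons c0 rest
  have hlast : ∃ cl, PySem.List.pyGet? input.toList (-1) = some cl ∧
      cl = input.toList.getD (input.toList.length - 1) ' ' := by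
    rw [PySem.List.pyGet?_neg_one]
    rcases hgl : input.toList.getLast? with _ | cl
    · rw [List.getLast?_eq_none_iff] at hgl; exact absurd hgl hne
    · refine ⟨cl, rfl, ?_⟩
      rw [List.getLast?_eq_getElem?] at hgl
      rw [List.getD_eq_getElem?_getD, hgl]
      rfl
  rcases hlast with ⟨cl, hgetl, hcl⟩
  unfold nonadjacent_operands nonadjacent_operands_alt
  simp only [hget0, hgetl]
  have heq0 : (pvOps.contains c0 || (c0 == '=')) = pvOps.contains c0 := by
    by_cases h : c0 = '=' <;> simp [h, pvOps]
  have heql : (pvOps.contains cl || (cl == '=')) = pvOps.contains cl := by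
    by_cases h : cl = '=' <;> simp [h, pvOps]
  rw [heq0, heql]
  by_cases h0 : c0 ∈ pvOps
  · simp [h0]
  by_cases hlop : cl ∈ pvOps
  · simp [h0, hlop]
  by_cases hcnt : PySem.Chars.count input.toList ['='] = 1
  · simp only [List.contains_eq_mem, h0, hlop, decide_false, Bool.or_self,
      if_false, hcnt, ne_eq, not_true_eq_false]
    have hh0 : input.toList.getD 0 ' ' ∉ pvOps := by
      rw [hcs]; simpa using h0
    have hhl : input.toList.getD (input.toList.length - 1) ' ' ∉ pvOps := by
      rw [← hcl]; exact hlop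
    have hmain := pvLoopA_range_eq_noAdj input.toList hne hh0 hhl
    rw [hmain, ← pvGaps_posFrom input.toList 0]
    rfl
  · simp [h0, hlop, hcnt]

-- ===== VERDICT (by name: the statement is the Claim_ definition above) =====
theorem nonadjacent_operands_spec : Claim_equal_nonadjacent_operands := by
  intro input _ hpre
  unfold Spec_nonadjacent_operands
  exact pvPorts_eq input hpre
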